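-- pv_equiv track=rewrite | github.com/umbe073/DeFi-Risk-Assessor | scripts/v2.0/web_portal/app/routes/pages.py | _recent_failure_streak
-- ===== SOURCE A (Python) =====
-- from typing import Any, Dict, List
--
-- def _normalize_service_status(value: Any) -> str:
--     normalized = str(value or "").strip().lower()
--     if normalized in {"online", "degraded", "offline", "disabled", "unknown"}:
--         return normalized
--     return "unknown"
--
-- def _recent_failure_streak(samples: List[dict]) -> tuple[int, str]:
--     streak = 0
--     streak_status = "none"
--     for sample in reversed(samples):
--         status = _normalize_service_status(sample.get("status"))
--         if status not in {"degraded", "offline"}: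
--             break
--         streak += 1
--         if status == "offline":
--             streak_status = "offline"
--         elif streak_status != "offline":
--             streak_status = "degraded"
--     return streak, streak_status
-- ===== SOURCE B (Python) =====
-- from typing import Any, List
--
-- def _normalize_service_status(value: Any) -> str:
--     normalized = str(value or "").strip().lower()
--     if normalized in {"online", "degraded", "offline", "disabled", "unknown"}:
--         return normalized
--     return "unknown"
--
-- def _recent_failure_streak(samples: List[dict]) -> tuple[int, str]:
--     # Forward full pass: remember the index of the last non-failing sample and of
--     # the last offline sample; the trailing failure streak is everything after the
--     # last non-failing sample.
--     last_ok = -1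
--     last_off = -1
--     i = 0
--     for sample in samples:
--         status = _normalize_service_status(sample.get("status"))
--         if status not in ("degraded", "offline"):
--             last_ok = i
--         elif status == "offline":
--             last_off = i
--         i += 1
--     streak = len(samples) - 1 - last_ok
--     if streak == 0:
--         return 0, "none"
--     return streak, "offline" if last_off > last_ok else "degraded"
-- ===== Notes on version B (the rewrite author's own statement) =====
-- stated objective: alternative
-- what changed: B replaces A's backward scan with early exit and inline streak/status accumulators by a forward full pass recording the indices of the last healthy and last offline samples, then derives the streak length and its status by index arithmetic.
import Mathlib
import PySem

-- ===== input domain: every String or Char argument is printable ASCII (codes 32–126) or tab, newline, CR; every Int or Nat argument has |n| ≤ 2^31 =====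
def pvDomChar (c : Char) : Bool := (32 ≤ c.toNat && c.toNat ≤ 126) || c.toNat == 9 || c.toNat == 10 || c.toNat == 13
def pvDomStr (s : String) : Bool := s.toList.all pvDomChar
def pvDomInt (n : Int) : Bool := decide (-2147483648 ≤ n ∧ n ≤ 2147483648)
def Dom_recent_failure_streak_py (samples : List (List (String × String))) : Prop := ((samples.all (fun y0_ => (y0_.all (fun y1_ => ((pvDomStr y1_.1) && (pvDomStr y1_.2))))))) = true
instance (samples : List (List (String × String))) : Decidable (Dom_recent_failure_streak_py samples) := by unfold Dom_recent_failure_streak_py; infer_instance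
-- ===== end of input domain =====

-- B replaces A's backward early-exit scan with a forward full pass that records the indices of the
-- last healthy and last offline samples and derives streak/status by index arithmetic (objective: alternative).


-- shared helper: port of _normalize_service_status (str(value or "").strip().lower(), whitelist)
def normalize_service_status (value : Option String) : String :=
  let normalized := PySem.Str.lower (PySem.Str.strip (value.getD ""))
  if normalized = "online" ∨ normalized = "degraded" ∨ normalized = "offline" ∨
     normalized = "disabled" ∨ normalized = "unknown" then normalized else "unknown"

-- ===== PORT A =====
-- the loop 'for sample in reversed(samples): … break …' with accumulators streak, streak_status
def recentFailureGoA : List (List (String × String)) → Int → String → Int × String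
  | [], streak, streak_status => (streak, streak_status)
  | sample :: rest, streak, streak_status =>
    let status := normalize_service_status ((PySem.Dict.mk sample).get? "status")
    if status = "degraded" ∨ status = "offline" then
      let streak := streak + 1
      let streak_status :=
        if status = "offline" then "offline"
        else if streak_status ≠ "offline" then "degraded" else streak_status
      recentFailureGoA rest streak streak_status
    else (streak, streak_status)

def recent_failure_streak_py (samples : List (List (String × String))) : Int × String :=
  recentFailureGoA samples.reverse 0 "none"

-- ===== PORT B =====
-- forward full pass: the loop body (status classification, index bookkeeping) as in Source B
def stepB (acc : Int × Int × Int) (sample : List (String × String)) : Int × Int × Int :=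
  let status := normalize_service_status ((PySem.Dict.mk sample).get? "status")
  if ¬(status = "degraded" ∨ status = "offline") then (acc.2.2, acc.2.1, acc.2.2 + 1)
  else if status = "offline" then (acc.1, acc.2.2, acc.2.2 + 1)
  else (acc.1, acc.2.1, acc.2.2 + 1)

def recent_failure_streak_py_alt (samples : List (List (String × String))) : Int × String :=
  let st := samples.foldl stepB (-1, -1, 0)
  let streak : Int := (samples.length : Int) - 1 - st.1
  if streak = 0 then (0, "none")
  else (streak, if st.2.1 > st.1 then "offline" else "degraded")

-- ===== PRECONDITION & SPEC =====
def Spec_recent_failure_streak_py (samples : List (List (String × String))) (out : Int × String) : Prop := out = recent_failure_streak_py_alt samples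
instance (samples : List (List (String × String))) (out : Int × String) : Decidable (Spec_recent_failure_streak_py samples out) := by unfold Spec_recent_failure_streak_py; infer_instance

-- ===== CLAIM (what is proved, stated in full; the proofs are below) =====
def Claim_equal_recent_failure_streak_py : Prop := ∀ (samples : List (List (String × String))), Dom_recent_failure_streak_py samples → Spec_recent_failure_streak_py samples (recent_failure_streak_py samples)

-- ===== LEMMAS AND PROOFS =====

-- the trailing failure run (normalized statuses of the reversed list up to the first healthy one);
-- proof-only abstraction relating both ports
def trailRun : List (List (String × String)) → List String
  | [] => []
  | sample :: rest =>
    let s := normalize_service_status ((PySem.Dict.mk sample).get? "status")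
    if s = "degraded" ∨ s = "offline" then s :: trailRun rest else []

-- A's loop through the trailing run
theorem recentFailureGoA_eq (l : List (List (String × String))) :
    ∀ (streak : Int) (st : String),
      recentFailureGoA l streak st =
        (streak + (trailRun l).length,
         if "offline" ∈ trailRun l then "offline"
         else if trailRun l = [] then st
         else if st = "offline" then "offline" else "degraded") := by
  induction l with
  | nil => intro streak st; simp [recentFailureGoA, trailRun]
  | cons sample rest ih =>
    intro streak st
    simp only [recentFailureGoA, trailRun]
    by_cases h : normalize_service_status ((PySem.Dict.mk sample).get? "status") = "degraded" ∨
        normalize_service_status ((PySem.Dict.mk sample).get? "status") = "offline"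
    · simp only [h, if_pos, ih]
      rcases h with h | h
      · by_cases hst : st = "offline" <;> simp [h, hst, List.mem_cons] <;> omega
      · simp [h, List.mem_cons]; omega
    · simp [h]

-- the trailing run is no longer than the list
theorem trailRun_length_le (l : List (List (String × String))) :
    (trailRun l).length ≤ l.length := by
  induction l with
  | nil => simp [trailRun]
  | cons a rest ih =>
    simp only [trailRun]
    split_ifs <;> simp_all <;> omega

-- B's fold through the trailing run of the reversed list
theorem foldB_eq (l : List (List (String × String))) :
    (l.foldl stepB (-1, -1, 0)).2.2 = (l.length : Int) ∧
    (l.foldl stepB (-1, -1, 0)).1 = (l.length : Int) - 1 - (trailRun l.reverse).length ∧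
    (l.foldl stepB (-1, -1, 0)).2.1 < (l.length : Int) ∧
    ((l.foldl stepB (-1, -1, 0)).2.1 > (l.foldl stepB (-1, -1, 0)).1 ↔
      "offline" ∈ trailRun l.reverse) := by
  induction l using List.reverseRecOn with
  | nil => simp [trailRun]
  | append_singleton l x ih =>
    obtain ⟨hi, hok, hoff, hmem⟩ := ih
    have hlen : ((trailRun l.reverse).length : Int) ≤ (l.length : Int) := by
      exact_mod_cast (trailRun_length_le l.reverse).trans (by simp)
    rw [List.foldl_append]
    simp only [List.foldl_cons, List.foldl_nil, List.reverse_append, List.reverse_singleton,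
      List.singleton_append, List.length_append, List.length_singleton]
    simp only [trailRun, stepB]
    by_cases hoff' : normalize_service_status ((PySem.Dict.mk x).get? "status") = "offline"
    · have hc : normalize_service_status ((PySem.Dict.mk x).get? "status") = "degraded" ∨
          normalize_service_status ((PySem.Dict.mk x).get? "status") = "offline" := Or.inr hoff'
      rw [if_neg (not_not_intro hc), if_pos hoff', if_pos hc]
      dsimp only
      refine ⟨by push_cast; omega, ?_, by omega, ?_⟩
      · simp only [hoff', List.length_cons]; push_cast; omega
      · simp only [hoff', List.mem_cons, true_or, iff_true, gt_iff_lt]; omega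
    · by_cases hd : normalize_service_status ((PySem.Dict.mk x).get? "status") = "degraded"
      · have hc : normalize_service_status ((PySem.Dict.mk x).get? "status") = "degraded" ∨
            normalize_service_status ((PySem.Dict.mk x).get? "status") = "offline" := Or.inl hd
        rw [if_neg (not_not_intro hc), if_neg hoff', if_pos hc]
        dsimp only
        refine ⟨by push_cast; omega, ?_, by omega, ?_⟩
        · simp only [List.length_cons]; push_cast; omega
        · rw [hmem]; simp [hd, List.mem_cons]
      · have hc : ¬(normalize_service_status ((PySem.Dict.mk x).get? "status") = "degraded" ∨
            normalize_service_status ((PySem.Dict.mk x).get? "status") = "offline") :=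
          fun hor => hor.elim hd hoff'
        rw [if_pos hc, if_neg hc]
        dsimp only
        refine ⟨by push_cast; omega, by simp only [List.length_nil]; push_cast; omega, by omega, ?_⟩
        simp only [List.not_mem_nil, iff_false, gt_iff_lt, not_lt]
        omega

-- ===== VERDICT (by name: the statement is the Claim_ definition above) =====
theorem recent_failure_streak_py_spec : Claim_equal_recent_failure_streak_py := by
  intro samples _
  unfold Spec_recent_failure_streak_py recent_failure_streak_py recent_failure_streak_py_alt
  obtain ⟨hi, hok, hoff, hmem⟩ := foldB_eq samples
  rw [recentFailureGoA_eq]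
  rcases h : trailRun samples.reverse with _ | ⟨s, rest⟩ <;> rw [h] at hok hmem
  · have h0 : (samples.length : Int) - 1 - (List.foldl stepB (-1, -1, 0) samples).1 = 0 := by
      simp only [List.length_nil, Nat.cast_zero] at hok; omega
    simp [h0]
  · have hlen : (((s :: rest).length : Nat) : Int) ≤ (samples.length : Int) := by
      rw [← h]; exact_mod_cast (trailRun_length_le samples.reverse).trans (by simp)
    have hz : ¬((samples.length : Int) - 1 - (List.foldl stepB (-1, -1, 0) samples).1 = 0) := by
      simp only [List.length_cons] at hok hlen; push_cast at hok hlen ⊢; omega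
    rw [if_neg hz]
    by_cases hin : "offline" ∈ s :: rest
    · rw [if_pos hin, if_pos (hmem.mpr hin)]
      simp only [Prod.mk.injEq, and_true]
      omega
    · have hne : ¬(s :: rest = []) := by simp
      rw [if_neg hin, if_neg hne, if_neg ((not_congr hmem).mpr hin)]
      simp only [Prod.mk.injEq]
      refine ⟨by omega, by simp⟩
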